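-- pv_equiv track=rewrite | github.com/DanielLVXO/lawnmover | lawnmover_map.py | calc_coverege
-- ===== SOURCE A (Python) =====
-- def calc_coverege(map, saved_map = False):
--     uncut_cells = 0
--     cut_cells = 0
--     for row in map:
--         for cell in row:
--             if saved_map: #för sparad karta
--                 if cell >= 1 and cell <= 6:
--                     cut_cells += 1
--                 elif cell >= 7:
--                     uncut_cells += 1
--             else: #för senaste klippning
--                 if cell == 1:
--                     uncut_cells += 1
--                 elif cell == 2:
--                     cut_cells += 1
--     return cut_cells, uncut_cells
-- ===== SOURCE B (Python) =====
-- def calc_coverege(map, saved_map=False):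
--     hist = {}
--     for row in map:
--         for cell in row:
--             hist[cell] = hist.get(cell, 0) + 1
--     if saved_map:
--         cut_cells = sum(v for k, v in hist.items() if 1 <= k <= 6)
--         uncut_cells = sum(v for k, v in hist.items() if k >= 7)
--     else:
--         cut_cells = hist.get(2, 0)
--         uncut_cells = hist.get(1, 0)
--     return cut_cells, uncut_cells
-- ===== Notes on version B (the rewrite author's own statement) =====
-- stated objective: alternative
-- what changed: B counts cells once into a value histogram (dict) and derives both totals in a second aggregation pass over the distinct values (or two direct lookups), instead of A's per-cell branching into two accumulators.
import Mathlib
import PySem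

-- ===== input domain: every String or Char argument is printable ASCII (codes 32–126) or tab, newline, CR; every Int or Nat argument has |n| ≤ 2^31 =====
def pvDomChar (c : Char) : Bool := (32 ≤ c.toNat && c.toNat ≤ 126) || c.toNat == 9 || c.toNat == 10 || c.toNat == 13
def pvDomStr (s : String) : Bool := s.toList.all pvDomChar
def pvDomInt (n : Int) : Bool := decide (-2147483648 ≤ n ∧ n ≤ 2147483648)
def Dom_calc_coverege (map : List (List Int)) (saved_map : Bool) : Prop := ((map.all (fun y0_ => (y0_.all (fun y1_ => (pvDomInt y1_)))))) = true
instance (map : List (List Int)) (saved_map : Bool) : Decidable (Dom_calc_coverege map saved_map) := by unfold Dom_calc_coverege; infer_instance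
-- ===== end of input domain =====

-- B builds a value histogram once (dict counter) and derives both totals in a second pass over distinct values; alternative decomposition, same asymptotic cost.


-- ===== PORT A =====
-- state: (uncut_cells, cut_cells), updated per cell exactly as A's branches
def calcStepA (saved_map : Bool) (st : Int × Int) (cell : Int) : Int × Int :=
  if saved_map then
    if 1 ≤ cell ∧ cell ≤ 6 then (st.1, st.2 + 1)
    else if 7 ≤ cell then (st.1 + 1, st.2)
    else st
  else
    if cell = 1 then (st.1 + 1, st.2)
    else if cell = 2 then (st.1, st.2 + 1)
    else st

def calc_coverege (map : List (List Int)) (saved_map : Bool) : Int × Int :=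
  let st := map.foldl (fun st row => row.foldl (calcStepA saved_map) st) (0, 0)
  (st.2, st.1)

-- ===== PORT B =====
def calc_coverege_alt (map : List (List Int)) (saved_map : Bool) : Int × Int :=
  let hist : PySem.Dict Int Int :=
    map.foldl (fun d row => row.foldl (fun d cell => d.insert cell (d.getD cell 0 + 1)) d) PySem.Dict.empty
  if saved_map then
    let cut_cells := (hist.items.filter (fun kv => decide (1 ≤ kv.1 ∧ kv.1 ≤ 6))).foldl (fun s kv => s + kv.2) 0
    let uncut_cells := (hist.items.filter (fun kv => decide (7 ≤ kv.1))).foldl (fun s kv => s + kv.2) 0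
    (cut_cells, uncut_cells)
  else
    (hist.getD 2 0, hist.getD 1 0)

-- ===== PRECONDITION & SPEC =====
def Spec_calc_coverege (map : List (List Int)) (saved_map : Bool) (out : Int × Int) : Prop := out = calc_coverege_alt map saved_map
instance (map : List (List Int)) (saved_map : Bool) (out : Int × Int) : Decidable (Spec_calc_coverege map saved_map out) := by unfold Spec_calc_coverege; infer_instance

-- ===== CLAIM (what is proved, stated in full; the proofs are below) =====
def Claim_equal_calc_coverege : Prop := ∀ (map : List (List Int)) (saved_map : Bool), Dom_calc_coverege map saved_map → Spec_calc_coverege map saved_map (calc_coverege map saved_map)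

-- ===== LEMMAS AND PROOFS =====

-- fold over rows = fold over the flattened cell list (both ports)
theorem foldl_rows_flatten {σ : Type} (g : σ → Int → σ) (rows : List (List Int)) (s : σ) :
    rows.foldl (fun s row => row.foldl g s) s = rows.flatten.foldl g s := by
  induction rows generalizing s with
  | nil => rfl
  | cons r rs ih => simp [List.foldl_append, ih]

-- A's inner fold computes the two per-category counts
theorem foldl_stepA (saved_map : Bool) (cells : List Int) (u c : Int) :
    cells.foldl (calcStepA saved_map) (u, c) =
      (if saved_map then
        (u + (cells.countP (fun x => decide (7 ≤ x)) : Int),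
         c + (cells.countP (fun x => decide (1 ≤ x ∧ x ≤ 6)) : Int))
      else
        (u + (cells.count 1 : Int), c + (cells.count 2 : Int))) := by
  induction cells generalizing u c with
  | nil => cases saved_map <;> simp [List.count]
  | cons x xs ih =>
    cases saved_map with
    | false =>
      simp only [List.foldl_cons, calcStepA]
      by_cases h1 : x = 1
      · simp [h1, ih, List.count_cons]; ring
      · by_cases h2 : x = 2
        · simp [h1, h2, ih, List.count_cons]; ring
        · simp [h1, h2, ih, List.count_cons, Ne.symm h1, Ne.symm h2]
    | true =>
      simp only [List.foldl_cons, calcStepA]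
      by_cases h1 : 1 ≤ x ∧ x ≤ 6
      · have h2 : ¬ 7 ≤ x := by omega
        simp [h1, h2, ih, List.countP_cons]; ring
      · by_cases h2 : 7 ≤ x
        · simp [h1, h2, ih, List.countP_cons]; ring
        · simp [h1, h2, ih, List.countP_cons]

-- B's histogram is the counter of the flattened cells
theorem hist_eq_counter (map : List (List Int)) :
    map.foldl (fun d row => row.foldl (fun d cell => d.insert cell (d.getD cell 0 + 1)) d) PySem.Dict.empty
      = PySem.Dict.counter map.flatten := by
  have h := foldl_rows_flatten (σ := PySem.Dict Int Int) (fun d cell => d.insert cell (d.getD cell 0 + 1)) map PySem.Dict.empty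
  rw [h]
  exact PySem.Dict.foldl_insert_getD_add_one_eq_counter map.flatten

theorem foldl_add_snd (l : List (Int × Int)) (s : Int) :
    l.foldl (fun s kv => s + kv.2) s = s + (l.map (·.2)).sum := by
  induction l generalizing s with
  | nil => simp
  | cons x xs ih => simp [ih]; ring

-- sum of counts over the filtered distinct values = countP over the list
theorem sum_counts_filter (p : Int → Bool) (cells : List Int) :
    (((PySem.Set.ofList cells).filter p).map (fun k => (cells.count k : Int))).sum
      = (cells.countP p : Int) := by
  have hperm : (PySem.Set.ofList cells).Perm cells.dedup := by
    rw [List.perm_ext_iff_of_nodup (PySem.Set.nodup_ofList cells) cells.nodup_dedup]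
    intro a
    rw [PySem.Set.mem_ofList, List.mem_dedup]
  have h2 : (((PySem.Set.ofList cells).filter p).map (fun k => (cells.count k : Int))).sum
      = ((cells.dedup.filter p).map (fun k => (cells.count k : Int))).sum :=
    ((hperm.filter p).map _).sum_eq
  rw [h2]
  have h3 := List.sum_map_count_dedup_filter_eq_countP p cells
  have h4 : ∀ l : List Int, ((l.map (fun k => (cells.count k : Int))).sum)
      = (((l.map (fun k => cells.count k)).sum : Nat) : Int) := by
    intro l
    induction l with
    | nil => simp
    | cons y ys ih => simp [ih]
  rw [h4, h3]

-- B's filtered-items sum, in closed form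
theorem items_sum (p : Int → Bool) (cells : List Int) :
    ((PySem.Dict.counter cells).items.filter (fun kv => p kv.1)).foldl (fun s kv => s + kv.2) 0
      = (cells.countP p : Int) := by
  rw [foldl_add_snd, PySem.Dict.items_counter, List.filter_map, List.map_map]
  simp only [Function.comp_def]
  rw [sum_counts_filter p cells]
  ring

-- ===== VERDICT (by name: the statement is the Claim_ definition above) =====
theorem calc_coverege_spec : Claim_equal_calc_coverege := by
  intro map saved_map _
  unfold Spec_calc_coverege calc_coverege calc_coverege_alt
  rw [hist_eq_counter map, foldl_rows_flatten (calcStepA saved_map) map (0, 0), foldl_stepA]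
  cases saved_map with
  | false =>
    simp [PySem.Dict.getD_counter]
  | true =>
    simp only [if_true]
    rw [items_sum (fun x => decide (1 ≤ x ∧ x ≤ 6)) map.flatten,
        items_sum (fun x => decide (7 ≤ x)) map.flatten]
    simp
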